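-- pv_equiv track=rewrite | github.com/Kawser-nerd/CLCDSA | Source Codes/CodeJamData/16/41/4.py | solve
-- ===== SOURCE A (Python) =====
-- def solve(r, p, s, priorities):
--     n = r + p + s
--     if n == 1:
--         if r == 1:
--             return [0]
--         elif p == 1:
--             return [1]
--         elif s == 1:
--             return [2]
--         assert False
--     assert n % 2 == 0
--     if r + p < s or r + s < p or s + p < r:
--         return None
--     low = r + p - s
--     if low % 2 != 0:
--         return None
--     a = low // 2
--     w = list(map(lambda r: sorted(r, key = lambda u: priorities[u]), [[0, 2], [1, 0], [1, 2]]))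
--     rr = [(list(map(lambda u: priorities[u], z)), i) for (i, z) in enumerate(w)]
--     rr.sort()
--     nn = [i for z, i in rr]
--     nprio = sorted([0, 1, 2], key = lambda u: nn[u])
--     l = solve(r - a, a, p - a, nprio)
--     if l == None:
--         return None
--     ll = []
--     for x in l:
--         ll += w[x]
--     return ll
-- ===== SOURCE B (Python) =====
-- def _level(priorities):
--     # stable 2-element sorts by priority, written as direct comparisons
--     def pair(x, y):
--         return [x, y] if priorities[x] <= priorities[y] else [y, x]
--     w = [pair(0, 2), pair(1, 0), pair(1, 2)]
--     keys = [([priorities[u] for u in z], i) for i, z in enumerate(w)]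
--     # rank of a key = how many keys are strictly smaller (keys are pairwise distinct)
--     def rank(k):
--         return sum(1 for k2 in keys if k2 < k)
--     return w, [rank(k) for k in keys]
--
-- def solve(r, p, s, priorities):
--     stack = []
--     while r + p + s != 1:
--         n = r + p + s
--         assert n % 2 == 0
--         if r + p < s or r + s < p or s + p < r:
--             return None
--         w, priorities = _level(priorities)
--         stack.append(w)
--         h = n // 2
--         r, p, s = h - p, h - s, h - r
--     if r == 1:
--         cur = [0]
--     elif p == 1:
--         cur = [1]
--     elif s == 1:
--         cur = [2]
--     else:
--         assert False
--     for w in reversed(stack):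
--         cur = [y for x in cur for y in w[x]]
--     return cur
-- ===== Notes on version B (the rewrite author's own statement) =====
-- stated objective: alternative
-- what changed: Recursion replaced by an iterative two-phase scheme (a downward while-loop that collects the per-level groups on an explicit stack, then one expansion fold over the saved stack); the per-level permutation is computed by rank counting instead of a double sort, the 2-element sorts by a direct comparison, and the dead 'low % 2' check (low is always even once n is even) is dropped.
import Mathlib
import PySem

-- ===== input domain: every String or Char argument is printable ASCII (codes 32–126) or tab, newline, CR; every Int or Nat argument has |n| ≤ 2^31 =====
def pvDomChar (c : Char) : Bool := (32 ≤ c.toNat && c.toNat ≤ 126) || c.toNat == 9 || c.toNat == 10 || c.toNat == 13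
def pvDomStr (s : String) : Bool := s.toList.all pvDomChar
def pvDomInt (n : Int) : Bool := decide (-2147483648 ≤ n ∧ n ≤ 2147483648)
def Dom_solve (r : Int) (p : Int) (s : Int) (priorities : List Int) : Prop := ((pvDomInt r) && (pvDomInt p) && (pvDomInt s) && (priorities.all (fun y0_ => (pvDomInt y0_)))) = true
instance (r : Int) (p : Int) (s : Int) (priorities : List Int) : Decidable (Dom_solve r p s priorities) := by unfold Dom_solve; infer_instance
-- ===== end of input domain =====

-- B is an iterative two-phase re-implementation of A (explicit stack + expansion fold,
-- rank counting instead of a double sort); equivalence is about return values (neither mutates).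

-- shared helper: Python's '<' on the ([int, int], int) sort keys (lexicographic; exact for int lists/tuples)
def pyListLt : List Int → List Int → Bool
  | [], [] => false
  | [], _ :: _ => true
  | _ :: _, [] => false
  | a :: as, b :: bs => a < b || (a == b && pyListLt as bs)

def keyLt (x y : List Int × Int) : Bool :=
  pyListLt x.1 y.1 || (x.1 == y.1 && decide (x.2 < y.2))

-- ===== PORT A =====

-- hand port of Python's list.sort() on (list, int) tuples: insertion sort with the exact
-- lexicographic '<'; exact here because the int components (the enumerate indices) make all keys distinct
def insSortKey : List (List Int × Int) → List (List Int × Int)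
  | [] => []
  | x :: xs => insKey x (insSortKey xs)
where insKey (x : List Int × Int) : List (List Int × Int) → List (List Int × Int)
  | [] => [x]
  | y :: ys => if keyLt x y then x :: y :: ys else y :: insKey x ys

-- A's per-level block: w, rr, rr.sort(), nn, nprio (priorities[u] ported as pyGetD; u ∈ {0,1,2},
-- exact whenever len(priorities) ≥ 3, which Pre_ guarantees on the paths that reach this block)
def levelA (priorities : List Int) : List (List Int) × List Int :=
  let w := [[0, 2], [1, 0], [1, 2]].map
    (fun r => PySem.List.sorted r (fun u => PySem.List.pyGetD priorities u 0) false)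
  let rr := (PySem.List.enumerate w).map
    (fun iz => (iz.2.map (fun u => PySem.List.pyGetD priorities u 0), iz.1))
  let rr' := insSortKey rr
  let nn := rr'.map (fun zi => zi.2)
  let nprio := PySem.List.sorted [0, 1, 2] (fun u => PySem.List.pyGetD nn u 0) false
  (w, nprio)

-- 'll = []; for x in l: ll += w[x]'
def expandA (w : List (List Int)) (l : List Int) : List Int :=
  l.foldl (fun ll x => ll ++ PySem.List.pyGetD w x []) []

-- fuel makes the recursion total; Python diverges only at (0,0,0)-like states (outside Pre_),
-- and the initial fuel below always exceeds the recursion depth on inputs where A returns.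
-- 'assert' failures and the base-case fall-through (Python raises) return none here; Pre_ excludes them.
def solveFuel : Nat → Int → Int → Int → List Int → Option (List Int)
  | 0, _, _, _, _ => none
  | fuel + 1, r, p, s, priorities =>
    let n := r + p + s
    if n = 1 then
      if r = 1 then some [0]
      else if p = 1 then some [1]
      else if s = 1 then some [2]
      else none
    else if PySem.Int.mod n 2 ≠ 0 then none
    else if r + p < s ∨ r + s < p ∨ s + p < r then none
    else
      let low := r + p - s
      if PySem.Int.mod low 2 ≠ 0 then none
      else
        let a := PySem.Int.floordiv low 2
        let wn := levelA priorities
        match solveFuel fuel (r - a) a (p - a) wn.2 with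
        | none => none
        | some l => some (expandA wn.1 l)

def solve (r : Int) (p : Int) (s : Int) (priorities : List Int) : Option (List Int) :=
  solveFuel ((r + p + s).natAbs + 1) r p s priorities

-- ===== PORT B =====

-- B's per-level block: direct-comparison 2-element sorts, rank counting for the permutation
def levelB (priorities : List Int) : List (List Int) × List Int :=
  let pv := fun (u : Int) => PySem.List.pyGetD priorities u 0
  let pair := fun (x y : Int) => if pv x ≤ pv y then [x, y] else [y, x]
  let w := [pair 0 2, pair 1 0, pair 1 2]
  let keys := (PySem.List.enumerate w).map (fun iz => (iz.2.map pv, iz.1))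
  let rank := fun (k : List Int × Int) => ((keys.filter (fun k2 => keyLt k2 k)).length : Int)
  (w, keys.map rank)

-- phase 1: the downward while-loop, carrying the stack of saved w's (deepest level at the head)
def loopB : Nat → Int → Int → Int → List Int → List (List (List Int)) → Option (List (List (List Int)) × List Int)
  | 0, _, _, _, _, _ => none
  | fuel + 1, r, p, s, priorities, stack =>
    let n := r + p + s
    if n = 1 then
      if r = 1 then some (stack, [0])
      else if p = 1 then some (stack, [1])
      else if s = 1 then some (stack, [2])
      else none
    else if PySem.Int.mod n 2 ≠ 0 then none
    else if r + p < s ∨ r + s < p ∨ s + p < r then none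
    else
      let wn := levelB priorities
      let h := PySem.Int.floordiv n 2
      loopB fuel (h - p) (h - s) (h - r) wn.2 (wn.1 :: stack)

-- phase 2: expand the base through the saved levels, deepest first
def solve_alt (r : Int) (p : Int) (s : Int) (priorities : List Int) : Option (List Int) :=
  match loopB ((r + p + s).natAbs + 1) r p s priorities [] with
  | none => none
  | some (stack, cur) =>
      some (stack.foldl (fun cur w => cur.flatMap (fun x => PySem.List.pyGetD w x [])) cur)

-- ===== PRECONDITION & SPEC =====

-- closed form for the counts A's recursion sees j levels down (Jacobsthal coefficients);
-- used only to state Pre_, never by either port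
def pvCoef (j : Nat) : Int := ((2 : Int) ^ j - (-1 : Int) ^ j) / 3

def pvLevelNeg (r : Int) (p : Int) (s : Int) (j : Nat) : Bool :=
  decide ((2 : Int) ^ j ∣ (r + p + s)) &&
    (let t := pvCoef j * ((r + p + s) / (2 : Int) ^ j)
     let c := if j % 3 = 0 then (r, p, s) else if j % 3 = 1 then (p, s, r) else (s, r, p)
     let sgn : Int := (-1 : Int) ^ (j + 1)
     decide (sgn * (t - c.1) < 0) || decide (sgn * (t - c.2.1) < 0) || decide (sgn * (t - c.2.2) < 0))

-- n > 0 is an exact power of two (n = 2 ^ Nat.log2 n characterises powers of two)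
def pvIsPow2 (n : Int) : Bool := 1 ≤ n && n.natAbs == 2 ^ Nat.log2 n.natAbs

-- Exactly the inputs on which the Python A returns normally (everything else raises or recurses
-- forever): the n=1 base case with one count equal to 1; or n even and either the top-level
-- triangle check fails (A returns None), or it passes (then priorities must have ≥ 3 entries,
-- or indexing raises) and the level-by-level counts, in closed form, either hit a negative entry
-- while n is still divisible (A returns None at that level) or n is a power of two (the
-- recursion bottoms out at the n=1 base). The range bound on j excludes NO input: pvLevelNeg j
-- requires 2^j ∣ n, which for n ≠ 0 forces j ≤ Nat.log2 |n|, and for n = 0 the pvLevelNeg 1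
-- branch already decides every input reaching it.
def Pre_solve (r : Int) (p : Int) (s : Int) (priorities : List Int) : Prop :=
  (r + p + s = 1 ∧ (r = 1 ∨ p = 1 ∨ s = 1)) ∨
  (r + p + s ≠ 1 ∧ (r + p + s) % 2 = 0 ∧
    (pvLevelNeg r p s 1 = true ∨
      (pvLevelNeg r p s 1 = false ∧ 3 ≤ priorities.length ∧
        (pvIsPow2 (r + p + s) = true ∨
          (∃ j ∈ Finset.range (Nat.log2 (r + p + s).natAbs + 1), 2 ≤ j ∧ pvLevelNeg r p s j = true)))))

instance (r : Int) (p : Int) (s : Int) (priorities : List Int) : Decidable (Pre_solve r p s priorities) := by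
  unfold Pre_solve; infer_instance

def pvWitness_solve : Int × Int × Int × List Int := (2, 1, 1, [3, 1, 2])

def Spec_solve (r : Int) (p : Int) (s : Int) (priorities : List Int) (out : Option (List Int)) : Prop :=
  out = solve_alt r p s priorities

instance (r : Int) (p : Int) (s : Int) (priorities : List Int) (out : Option (List Int)) : Decidable (Spec_solve r p s priorities out) := by
  unfold Spec_solve; infer_instance

-- ===== CLAIM (what is proved, stated in full; the proofs are below) =====
def Claim_equal_solve : Prop := ∀ (r : Int) (p : Int) (s : Int) (priorities : List Int), Dom_solve r p s priorities → Pre_solve r p s priorities → Spec_solve r p s priorities (solve r p s priorities)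



-- ===== LEMMAS AND PROOFS =====

theorem level_eq (prio : List Int) : levelA prio = levelB prio := by
  rcases lt_trichotomy (PySem.List.pyGetD prio (0 : Int) 0) (PySem.List.pyGetD prio (1 : Int) 0) with h1 | h1 | h1 <;>
    rcases lt_trichotomy (PySem.List.pyGetD prio (0 : Int) 0) (PySem.List.pyGetD prio (2 : Int) 0) with h2 | h2 | h2 <;>
      rcases lt_trichotomy (PySem.List.pyGetD prio (1 : Int) 0) (PySem.List.pyGetD prio (2 : Int) 0) with h3 | h3 | h3
  · have h1a : ¬ (PySem.List.pyGetD prio (1 : Int) 0) < (PySem.List.pyGetD prio (0 : Int) 0) := by omega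
    have h1b : (PySem.List.pyGetD prio (0 : Int) 0) ≠ (PySem.List.pyGetD prio (1 : Int) 0) := by omega
    have h1c : (PySem.List.pyGetD prio (1 : Int) 0) ≠ (PySem.List.pyGetD prio (0 : Int) 0) := by omega
    have h1d : (PySem.List.pyGetD prio (0 : Int) 0) ≤ (PySem.List.pyGetD prio (1 : Int) 0) := by omega
    have h1e : ¬ (PySem.List.pyGetD prio (1 : Int) 0) ≤ (PySem.List.pyGetD prio (0 : Int) 0) := by omega
    have h2a : ¬ (PySem.List.pyGetD prio (2 : Int) 0) < (PySem.List.pyGetD prio (0 : Int) 0) := by omega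
    have h2b : (PySem.List.pyGetD prio (0 : Int) 0) ≠ (PySem.List.pyGetD prio (2 : Int) 0) := by omega
    have h2c : (PySem.List.pyGetD prio (2 : Int) 0) ≠ (PySem.List.pyGetD prio (0 : Int) 0) := by omega
    have h2d : (PySem.List.pyGetD prio (0 : Int) 0) ≤ (PySem.List.pyGetD prio (2 : Int) 0) := by omega
    have h2e : ¬ (PySem.List.pyGetD prio (2 : Int) 0) ≤ (PySem.List.pyGetD prio (0 : Int) 0) := by omega
    have h3a : ¬ (PySem.List.pyGetD prio (2 : Int) 0) < (PySem.List.pyGetD prio (1 : Int) 0) := by omega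
    have h3b : (PySem.List.pyGetD prio (1 : Int) 0) ≠ (PySem.List.pyGetD prio (2 : Int) 0) := by omega
    have h3c : (PySem.List.pyGetD prio (2 : Int) 0) ≠ (PySem.List.pyGetD prio (1 : Int) 0) := by omega
    have h3d : (PySem.List.pyGetD prio (1 : Int) 0) ≤ (PySem.List.pyGetD prio (2 : Int) 0) := by omega
    have h3e : ¬ (PySem.List.pyGetD prio (2 : Int) 0) ≤ (PySem.List.pyGetD prio (1 : Int) 0) := by omega
    simp [levelA, levelB, PySem.List.sorted_eq_foldl_insertBy, PySem.List.insertBy,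
        insSortKey, insSortKey.insKey, keyLt, pyListLt,
        PySem.List.enumerate_cons, PySem.List.enumerate_nil, beq_iff_eq,
        h1, h1a, h1b, h1c, h1d, h1e, h2, h2a, h2b, h2c, h2d, h2e, h3, h3a, h3b, h3c, h3d, h3e]
    all_goals decide
  · have h1a : ¬ (PySem.List.pyGetD prio (1 : Int) 0) < (PySem.List.pyGetD prio (0 : Int) 0) := by omega
    have h1b : (PySem.List.pyGetD prio (0 : Int) 0) ≠ (PySem.List.pyGetD prio (1 : Int) 0) := by omega
    have h1c : (PySem.List.pyGetD prio (1 : Int) 0) ≠ (PySem.List.pyGetD prio (0 : Int) 0) := by omega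
    have h1d : (PySem.List.pyGetD prio (0 : Int) 0) ≤ (PySem.List.pyGetD prio (1 : Int) 0) := by omega
    have h1e : ¬ (PySem.List.pyGetD prio (1 : Int) 0) ≤ (PySem.List.pyGetD prio (0 : Int) 0) := by omega
    have h2a : ¬ (PySem.List.pyGetD prio (2 : Int) 0) < (PySem.List.pyGetD prio (0 : Int) 0) := by omega
    have h2b : (PySem.List.pyGetD prio (0 : Int) 0) ≠ (PySem.List.pyGetD prio (2 : Int) 0) := by omega
    have h2c : (PySem.List.pyGetD prio (2 : Int) 0) ≠ (PySem.List.pyGetD prio (0 : Int) 0) := by omega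
    have h2d : (PySem.List.pyGetD prio (0 : Int) 0) ≤ (PySem.List.pyGetD prio (2 : Int) 0) := by omega
    have h2e : ¬ (PySem.List.pyGetD prio (2 : Int) 0) ≤ (PySem.List.pyGetD prio (0 : Int) 0) := by omega
    simp [levelA, levelB, PySem.List.sorted_eq_foldl_insertBy, PySem.List.insertBy,
        insSortKey, insSortKey.insKey, keyLt, pyListLt,
        PySem.List.enumerate_cons, PySem.List.enumerate_nil, beq_iff_eq,
        h1, h1a, h1b, h1c, h1d, h1e, h2, h2a, h2b, h2c, h2d, h2e, h3]
    all_goals decide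
  · have h1a : ¬ (PySem.List.pyGetD prio (1 : Int) 0) < (PySem.List.pyGetD prio (0 : Int) 0) := by omega
    have h1b : (PySem.List.pyGetD prio (0 : Int) 0) ≠ (PySem.List.pyGetD prio (1 : Int) 0) := by omega
    have h1c : (PySem.List.pyGetD prio (1 : Int) 0) ≠ (PySem.List.pyGetD prio (0 : Int) 0) := by omega
    have h1d : (PySem.List.pyGetD prio (0 : Int) 0) ≤ (PySem.List.pyGetD prio (1 : Int) 0) := by omega
    have h1e : ¬ (PySem.List.pyGetD prio (1 : Int) 0) ≤ (PySem.List.pyGetD prio (0 : Int) 0) := by omega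
    have h2a : ¬ (PySem.List.pyGetD prio (2 : Int) 0) < (PySem.List.pyGetD prio (0 : Int) 0) := by omega
    have h2b : (PySem.List.pyGetD prio (0 : Int) 0) ≠ (PySem.List.pyGetD prio (2 : Int) 0) := by omega
    have h2c : (PySem.List.pyGetD prio (2 : Int) 0) ≠ (PySem.List.pyGetD prio (0 : Int) 0) := by omega
    have h2d : (PySem.List.pyGetD prio (0 : Int) 0) ≤ (PySem.List.pyGetD prio (2 : Int) 0) := by omega
    have h2e : ¬ (PySem.List.pyGetD prio (2 : Int) 0) ≤ (PySem.List.pyGetD prio (0 : Int) 0) := by omega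
    have h3a : ¬ (PySem.List.pyGetD prio (1 : Int) 0) < (PySem.List.pyGetD prio (2 : Int) 0) := by omega
    have h3b : (PySem.List.pyGetD prio (2 : Int) 0) ≠ (PySem.List.pyGetD prio (1 : Int) 0) := by omega
    have h3c : (PySem.List.pyGetD prio (1 : Int) 0) ≠ (PySem.List.pyGetD prio (2 : Int) 0) := by omega
    have h3d : (PySem.List.pyGetD prio (2 : Int) 0) ≤ (PySem.List.pyGetD prio (1 : Int) 0) := by omega
    have h3e : ¬ (PySem.List.pyGetD prio (1 : Int) 0) ≤ (PySem.List.pyGetD prio (2 : Int) 0) := by omega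
    simp [levelA, levelB, PySem.List.sorted_eq_foldl_insertBy, PySem.List.insertBy,
        insSortKey, insSortKey.insKey, keyLt, pyListLt,
        PySem.List.enumerate_cons, PySem.List.enumerate_nil, beq_iff_eq,
        h1, h1a, h1b, h1c, h1d, h1e, h2, h2a, h2b, h2c, h2d, h2e, h3, h3a, h3b, h3c, h3d, h3e]
    all_goals decide
  · exfalso; omega
  · exfalso; omega
  · have h1a : ¬ (PySem.List.pyGetD prio (1 : Int) 0) < (PySem.List.pyGetD prio (0 : Int) 0) := by omega
    have h1b : (PySem.List.pyGetD prio (0 : Int) 0) ≠ (PySem.List.pyGetD prio (1 : Int) 0) := by omega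
    have h1c : (PySem.List.pyGetD prio (1 : Int) 0) ≠ (PySem.List.pyGetD prio (0 : Int) 0) := by omega
    have h1d : (PySem.List.pyGetD prio (0 : Int) 0) ≤ (PySem.List.pyGetD prio (1 : Int) 0) := by omega
    have h1e : ¬ (PySem.List.pyGetD prio (1 : Int) 0) ≤ (PySem.List.pyGetD prio (0 : Int) 0) := by omega
    have h3a : ¬ (PySem.List.pyGetD prio (1 : Int) 0) < (PySem.List.pyGetD prio (2 : Int) 0) := by omega
    have h3b : (PySem.List.pyGetD prio (2 : Int) 0) ≠ (PySem.List.pyGetD prio (1 : Int) 0) := by omega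
    have h3c : (PySem.List.pyGetD prio (1 : Int) 0) ≠ (PySem.List.pyGetD prio (2 : Int) 0) := by omega
    have h3d : (PySem.List.pyGetD prio (2 : Int) 0) ≤ (PySem.List.pyGetD prio (1 : Int) 0) := by omega
    have h3e : ¬ (PySem.List.pyGetD prio (1 : Int) 0) ≤ (PySem.List.pyGetD prio (2 : Int) 0) := by omega
    simp [levelA, levelB, PySem.List.sorted_eq_foldl_insertBy, PySem.List.insertBy,
        insSortKey, insSortKey.insKey, keyLt, pyListLt,
        PySem.List.enumerate_cons, PySem.List.enumerate_nil, beq_iff_eq,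
        h1, h1a, h1b, h1c, h1d, h1e, h2, h3, h3a, h3b, h3c, h3d, h3e]
    all_goals decide
  · exfalso; omega
  · exfalso; omega
  · have h1a : ¬ (PySem.List.pyGetD prio (1 : Int) 0) < (PySem.List.pyGetD prio (0 : Int) 0) := by omega
    have h1b : (PySem.List.pyGetD prio (0 : Int) 0) ≠ (PySem.List.pyGetD prio (1 : Int) 0) := by omega
    have h1c : (PySem.List.pyGetD prio (1 : Int) 0) ≠ (PySem.List.pyGetD prio (0 : Int) 0) := by omega
    have h1d : (PySem.List.pyGetD prio (0 : Int) 0) ≤ (PySem.List.pyGetD prio (1 : Int) 0) := by omega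
    have h1e : ¬ (PySem.List.pyGetD prio (1 : Int) 0) ≤ (PySem.List.pyGetD prio (0 : Int) 0) := by omega
    have h2a : ¬ (PySem.List.pyGetD prio (0 : Int) 0) < (PySem.List.pyGetD prio (2 : Int) 0) := by omega
    have h2b : (PySem.List.pyGetD prio (2 : Int) 0) ≠ (PySem.List.pyGetD prio (0 : Int) 0) := by omega
    have h2c : (PySem.List.pyGetD prio (0 : Int) 0) ≠ (PySem.List.pyGetD prio (2 : Int) 0) := by omega
    have h2d : (PySem.List.pyGetD prio (2 : Int) 0) ≤ (PySem.List.pyGetD prio (0 : Int) 0) := by omega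
    have h2e : ¬ (PySem.List.pyGetD prio (0 : Int) 0) ≤ (PySem.List.pyGetD prio (2 : Int) 0) := by omega
    have h3a : ¬ (PySem.List.pyGetD prio (1 : Int) 0) < (PySem.List.pyGetD prio (2 : Int) 0) := by omega
    have h3b : (PySem.List.pyGetD prio (2 : Int) 0) ≠ (PySem.List.pyGetD prio (1 : Int) 0) := by omega
    have h3c : (PySem.List.pyGetD prio (1 : Int) 0) ≠ (PySem.List.pyGetD prio (2 : Int) 0) := by omega
    have h3d : (PySem.List.pyGetD prio (2 : Int) 0) ≤ (PySem.List.pyGetD prio (1 : Int) 0) := by omega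
    have h3e : ¬ (PySem.List.pyGetD prio (1 : Int) 0) ≤ (PySem.List.pyGetD prio (2 : Int) 0) := by omega
    simp [levelA, levelB, PySem.List.sorted_eq_foldl_insertBy, PySem.List.insertBy,
        insSortKey, insSortKey.insKey, keyLt, pyListLt,
        PySem.List.enumerate_cons, PySem.List.enumerate_nil, beq_iff_eq,
        h1, h1a, h1b, h1c, h1d, h1e, h2, h2a, h2b, h2c, h2d, h2e, h3, h3a, h3b, h3c, h3d, h3e]
    all_goals decide
  · have h2a : ¬ (PySem.List.pyGetD prio (2 : Int) 0) < (PySem.List.pyGetD prio (0 : Int) 0) := by omega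
    have h2b : (PySem.List.pyGetD prio (0 : Int) 0) ≠ (PySem.List.pyGetD prio (2 : Int) 0) := by omega
    have h2c : (PySem.List.pyGetD prio (2 : Int) 0) ≠ (PySem.List.pyGetD prio (0 : Int) 0) := by omega
    have h2d : (PySem.List.pyGetD prio (0 : Int) 0) ≤ (PySem.List.pyGetD prio (2 : Int) 0) := by omega
    have h2e : ¬ (PySem.List.pyGetD prio (2 : Int) 0) ≤ (PySem.List.pyGetD prio (0 : Int) 0) := by omega
    have h3a : ¬ (PySem.List.pyGetD prio (2 : Int) 0) < (PySem.List.pyGetD prio (1 : Int) 0) := by omega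
    have h3b : (PySem.List.pyGetD prio (1 : Int) 0) ≠ (PySem.List.pyGetD prio (2 : Int) 0) := by omega
    have h3c : (PySem.List.pyGetD prio (2 : Int) 0) ≠ (PySem.List.pyGetD prio (1 : Int) 0) := by omega
    have h3d : (PySem.List.pyGetD prio (1 : Int) 0) ≤ (PySem.List.pyGetD prio (2 : Int) 0) := by omega
    have h3e : ¬ (PySem.List.pyGetD prio (2 : Int) 0) ≤ (PySem.List.pyGetD prio (1 : Int) 0) := by omega
    simp [levelA, levelB, PySem.List.sorted_eq_foldl_insertBy, PySem.List.insertBy,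
        insSortKey, insSortKey.insKey, keyLt, pyListLt,
        PySem.List.enumerate_cons, PySem.List.enumerate_nil, beq_iff_eq,
        h1, h2, h2a, h2b, h2c, h2d, h2e, h3, h3a, h3b, h3c, h3d, h3e]
    all_goals decide
  · exfalso; omega
  · exfalso; omega
  · exfalso; omega
  · simp [levelA, levelB, PySem.List.sorted_eq_foldl_insertBy, PySem.List.insertBy,
        insSortKey, insSortKey.insKey, keyLt, pyListLt,
        PySem.List.enumerate_cons, PySem.List.enumerate_nil, beq_iff_eq,
        h1, h2, h3]
    all_goals decide
  · exfalso; omega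
  · exfalso; omega
  · exfalso; omega
  · have h2a : ¬ (PySem.List.pyGetD prio (0 : Int) 0) < (PySem.List.pyGetD prio (2 : Int) 0) := by omega
    have h2b : (PySem.List.pyGetD prio (2 : Int) 0) ≠ (PySem.List.pyGetD prio (0 : Int) 0) := by omega
    have h2c : (PySem.List.pyGetD prio (0 : Int) 0) ≠ (PySem.List.pyGetD prio (2 : Int) 0) := by omega
    have h2d : (PySem.List.pyGetD prio (2 : Int) 0) ≤ (PySem.List.pyGetD prio (0 : Int) 0) := by omega
    have h2e : ¬ (PySem.List.pyGetD prio (0 : Int) 0) ≤ (PySem.List.pyGetD prio (2 : Int) 0) := by omega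
    have h3a : ¬ (PySem.List.pyGetD prio (1 : Int) 0) < (PySem.List.pyGetD prio (2 : Int) 0) := by omega
    have h3b : (PySem.List.pyGetD prio (2 : Int) 0) ≠ (PySem.List.pyGetD prio (1 : Int) 0) := by omega
    have h3c : (PySem.List.pyGetD prio (1 : Int) 0) ≠ (PySem.List.pyGetD prio (2 : Int) 0) := by omega
    have h3d : (PySem.List.pyGetD prio (2 : Int) 0) ≤ (PySem.List.pyGetD prio (1 : Int) 0) := by omega
    have h3e : ¬ (PySem.List.pyGetD prio (1 : Int) 0) ≤ (PySem.List.pyGetD prio (2 : Int) 0) := by omega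
    simp [levelA, levelB, PySem.List.sorted_eq_foldl_insertBy, PySem.List.insertBy,
        insSortKey, insSortKey.insKey, keyLt, pyListLt,
        PySem.List.enumerate_cons, PySem.List.enumerate_nil, beq_iff_eq,
        h1, h2, h2a, h2b, h2c, h2d, h2e, h3, h3a, h3b, h3c, h3d, h3e]
    all_goals decide
  · have h1a : ¬ (PySem.List.pyGetD prio (0 : Int) 0) < (PySem.List.pyGetD prio (1 : Int) 0) := by omega
    have h1b : (PySem.List.pyGetD prio (1 : Int) 0) ≠ (PySem.List.pyGetD prio (0 : Int) 0) := by omega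
    have h1c : (PySem.List.pyGetD prio (0 : Int) 0) ≠ (PySem.List.pyGetD prio (1 : Int) 0) := by omega
    have h1d : (PySem.List.pyGetD prio (1 : Int) 0) ≤ (PySem.List.pyGetD prio (0 : Int) 0) := by omega
    have h1e : ¬ (PySem.List.pyGetD prio (0 : Int) 0) ≤ (PySem.List.pyGetD prio (1 : Int) 0) := by omega
    have h2a : ¬ (PySem.List.pyGetD prio (2 : Int) 0) < (PySem.List.pyGetD prio (0 : Int) 0) := by omega
    have h2b : (PySem.List.pyGetD prio (0 : Int) 0) ≠ (PySem.List.pyGetD prio (2 : Int) 0) := by omega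
    have h2c : (PySem.List.pyGetD prio (2 : Int) 0) ≠ (PySem.List.pyGetD prio (0 : Int) 0) := by omega
    have h2d : (PySem.List.pyGetD prio (0 : Int) 0) ≤ (PySem.List.pyGetD prio (2 : Int) 0) := by omega
    have h2e : ¬ (PySem.List.pyGetD prio (2 : Int) 0) ≤ (PySem.List.pyGetD prio (0 : Int) 0) := by omega
    have h3a : ¬ (PySem.List.pyGetD prio (2 : Int) 0) < (PySem.List.pyGetD prio (1 : Int) 0) := by omega
    have h3b : (PySem.List.pyGetD prio (1 : Int) 0) ≠ (PySem.List.pyGetD prio (2 : Int) 0) := by omega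
    have h3c : (PySem.List.pyGetD prio (2 : Int) 0) ≠ (PySem.List.pyGetD prio (1 : Int) 0) := by omega
    have h3d : (PySem.List.pyGetD prio (1 : Int) 0) ≤ (PySem.List.pyGetD prio (2 : Int) 0) := by omega
    have h3e : ¬ (PySem.List.pyGetD prio (2 : Int) 0) ≤ (PySem.List.pyGetD prio (1 : Int) 0) := by omega
    simp [levelA, levelB, PySem.List.sorted_eq_foldl_insertBy, PySem.List.insertBy,
        insSortKey, insSortKey.insKey, keyLt, pyListLt,
        PySem.List.enumerate_cons, PySem.List.enumerate_nil, beq_iff_eq,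
        h1, h1a, h1b, h1c, h1d, h1e, h2, h2a, h2b, h2c, h2d, h2e, h3, h3a, h3b, h3c, h3d, h3e]
    all_goals decide
  · exfalso; omega
  · exfalso; omega
  · have h1a : ¬ (PySem.List.pyGetD prio (0 : Int) 0) < (PySem.List.pyGetD prio (1 : Int) 0) := by omega
    have h1b : (PySem.List.pyGetD prio (1 : Int) 0) ≠ (PySem.List.pyGetD prio (0 : Int) 0) := by omega
    have h1c : (PySem.List.pyGetD prio (0 : Int) 0) ≠ (PySem.List.pyGetD prio (1 : Int) 0) := by omega
    have h1d : (PySem.List.pyGetD prio (1 : Int) 0) ≤ (PySem.List.pyGetD prio (0 : Int) 0) := by omega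
    have h1e : ¬ (PySem.List.pyGetD prio (0 : Int) 0) ≤ (PySem.List.pyGetD prio (1 : Int) 0) := by omega
    have h3a : ¬ (PySem.List.pyGetD prio (2 : Int) 0) < (PySem.List.pyGetD prio (1 : Int) 0) := by omega
    have h3b : (PySem.List.pyGetD prio (1 : Int) 0) ≠ (PySem.List.pyGetD prio (2 : Int) 0) := by omega
    have h3c : (PySem.List.pyGetD prio (2 : Int) 0) ≠ (PySem.List.pyGetD prio (1 : Int) 0) := by omega
    have h3d : (PySem.List.pyGetD prio (1 : Int) 0) ≤ (PySem.List.pyGetD prio (2 : Int) 0) := by omega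
    have h3e : ¬ (PySem.List.pyGetD prio (2 : Int) 0) ≤ (PySem.List.pyGetD prio (1 : Int) 0) := by omega
    simp [levelA, levelB, PySem.List.sorted_eq_foldl_insertBy, PySem.List.insertBy,
        insSortKey, insSortKey.insKey, keyLt, pyListLt,
        PySem.List.enumerate_cons, PySem.List.enumerate_nil, beq_iff_eq,
        h1, h1a, h1b, h1c, h1d, h1e, h2, h3, h3a, h3b, h3c, h3d, h3e]
    all_goals decide
  · exfalso; omega
  · exfalso; omega
  · have h1a : ¬ (PySem.List.pyGetD prio (0 : Int) 0) < (PySem.List.pyGetD prio (1 : Int) 0) := by omega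
    have h1b : (PySem.List.pyGetD prio (1 : Int) 0) ≠ (PySem.List.pyGetD prio (0 : Int) 0) := by omega
    have h1c : (PySem.List.pyGetD prio (0 : Int) 0) ≠ (PySem.List.pyGetD prio (1 : Int) 0) := by omega
    have h1d : (PySem.List.pyGetD prio (1 : Int) 0) ≤ (PySem.List.pyGetD prio (0 : Int) 0) := by omega
    have h1e : ¬ (PySem.List.pyGetD prio (0 : Int) 0) ≤ (PySem.List.pyGetD prio (1 : Int) 0) := by omega
    have h2a : ¬ (PySem.List.pyGetD prio (0 : Int) 0) < (PySem.List.pyGetD prio (2 : Int) 0) := by omega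
    have h2b : (PySem.List.pyGetD prio (2 : Int) 0) ≠ (PySem.List.pyGetD prio (0 : Int) 0) := by omega
    have h2c : (PySem.List.pyGetD prio (0 : Int) 0) ≠ (PySem.List.pyGetD prio (2 : Int) 0) := by omega
    have h2d : (PySem.List.pyGetD prio (2 : Int) 0) ≤ (PySem.List.pyGetD prio (0 : Int) 0) := by omega
    have h2e : ¬ (PySem.List.pyGetD prio (0 : Int) 0) ≤ (PySem.List.pyGetD prio (2 : Int) 0) := by omega
    have h3a : ¬ (PySem.List.pyGetD prio (2 : Int) 0) < (PySem.List.pyGetD prio (1 : Int) 0) := by omega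
    have h3b : (PySem.List.pyGetD prio (1 : Int) 0) ≠ (PySem.List.pyGetD prio (2 : Int) 0) := by omega
    have h3c : (PySem.List.pyGetD prio (2 : Int) 0) ≠ (PySem.List.pyGetD prio (1 : Int) 0) := by omega
    have h3d : (PySem.List.pyGetD prio (1 : Int) 0) ≤ (PySem.List.pyGetD prio (2 : Int) 0) := by omega
    have h3e : ¬ (PySem.List.pyGetD prio (2 : Int) 0) ≤ (PySem.List.pyGetD prio (1 : Int) 0) := by omega
    simp [levelA, levelB, PySem.List.sorted_eq_foldl_insertBy, PySem.List.insertBy,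
        insSortKey, insSortKey.insKey, keyLt, pyListLt,
        PySem.List.enumerate_cons, PySem.List.enumerate_nil, beq_iff_eq,
        h1, h1a, h1b, h1c, h1d, h1e, h2, h2a, h2b, h2c, h2d, h2e, h3, h3a, h3b, h3c, h3d, h3e]
    all_goals decide
  · have h1a : ¬ (PySem.List.pyGetD prio (0 : Int) 0) < (PySem.List.pyGetD prio (1 : Int) 0) := by omega
    have h1b : (PySem.List.pyGetD prio (1 : Int) 0) ≠ (PySem.List.pyGetD prio (0 : Int) 0) := by omega
    have h1c : (PySem.List.pyGetD prio (0 : Int) 0) ≠ (PySem.List.pyGetD prio (1 : Int) 0) := by omega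
    have h1d : (PySem.List.pyGetD prio (1 : Int) 0) ≤ (PySem.List.pyGetD prio (0 : Int) 0) := by omega
    have h1e : ¬ (PySem.List.pyGetD prio (0 : Int) 0) ≤ (PySem.List.pyGetD prio (1 : Int) 0) := by omega
    have h2a : ¬ (PySem.List.pyGetD prio (0 : Int) 0) < (PySem.List.pyGetD prio (2 : Int) 0) := by omega
    have h2b : (PySem.List.pyGetD prio (2 : Int) 0) ≠ (PySem.List.pyGetD prio (0 : Int) 0) := by omega
    have h2c : (PySem.List.pyGetD prio (0 : Int) 0) ≠ (PySem.List.pyGetD prio (2 : Int) 0) := by omega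
    have h2d : (PySem.List.pyGetD prio (2 : Int) 0) ≤ (PySem.List.pyGetD prio (0 : Int) 0) := by omega
    have h2e : ¬ (PySem.List.pyGetD prio (0 : Int) 0) ≤ (PySem.List.pyGetD prio (2 : Int) 0) := by omega
    simp [levelA, levelB, PySem.List.sorted_eq_foldl_insertBy, PySem.List.insertBy,
        insSortKey, insSortKey.insKey, keyLt, pyListLt,
        PySem.List.enumerate_cons, PySem.List.enumerate_nil, beq_iff_eq,
        h1, h1a, h1b, h1c, h1d, h1e, h2, h2a, h2b, h2c, h2d, h2e, h3]
    all_goals decide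
  · have h1a : ¬ (PySem.List.pyGetD prio (0 : Int) 0) < (PySem.List.pyGetD prio (1 : Int) 0) := by omega
    have h1b : (PySem.List.pyGetD prio (1 : Int) 0) ≠ (PySem.List.pyGetD prio (0 : Int) 0) := by omega
    have h1c : (PySem.List.pyGetD prio (0 : Int) 0) ≠ (PySem.List.pyGetD prio (1 : Int) 0) := by omega
    have h1d : (PySem.List.pyGetD prio (1 : Int) 0) ≤ (PySem.List.pyGetD prio (0 : Int) 0) := by omega
    have h1e : ¬ (PySem.List.pyGetD prio (0 : Int) 0) ≤ (PySem.List.pyGetD prio (1 : Int) 0) := by omega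
    have h2a : ¬ (PySem.List.pyGetD prio (0 : Int) 0) < (PySem.List.pyGetD prio (2 : Int) 0) := by omega
    have h2b : (PySem.List.pyGetD prio (2 : Int) 0) ≠ (PySem.List.pyGetD prio (0 : Int) 0) := by omega
    have h2c : (PySem.List.pyGetD prio (0 : Int) 0) ≠ (PySem.List.pyGetD prio (2 : Int) 0) := by omega
    have h2d : (PySem.List.pyGetD prio (2 : Int) 0) ≤ (PySem.List.pyGetD prio (0 : Int) 0) := by omega
    have h2e : ¬ (PySem.List.pyGetD prio (0 : Int) 0) ≤ (PySem.List.pyGetD prio (2 : Int) 0) := by omega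
    have h3a : ¬ (PySem.List.pyGetD prio (1 : Int) 0) < (PySem.List.pyGetD prio (2 : Int) 0) := by omega
    have h3b : (PySem.List.pyGetD prio (2 : Int) 0) ≠ (PySem.List.pyGetD prio (1 : Int) 0) := by omega
    have h3c : (PySem.List.pyGetD prio (1 : Int) 0) ≠ (PySem.List.pyGetD prio (2 : Int) 0) := by omega
    have h3d : (PySem.List.pyGetD prio (2 : Int) 0) ≤ (PySem.List.pyGetD prio (1 : Int) 0) := by omega
    have h3e : ¬ (PySem.List.pyGetD prio (1 : Int) 0) ≤ (PySem.List.pyGetD prio (2 : Int) 0) := by omega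
    simp [levelA, levelB, PySem.List.sorted_eq_foldl_insertBy, PySem.List.insertBy,
        insSortKey, insSortKey.insKey, keyLt, pyListLt,
        PySem.List.enumerate_cons, PySem.List.enumerate_nil, beq_iff_eq,
        h1, h1a, h1b, h1c, h1d, h1e, h2, h2a, h2b, h2c, h2d, h2e, h3, h3a, h3b, h3c, h3d, h3e]
    all_goals decide

theorem loopB_stack (fuel : Nat) : ∀ (r p s : Int) (prio : List Int) (st : List (List (List Int))),
    loopB fuel r p s prio st = (loopB fuel r p s prio []).map (fun q => (q.1 ++ st, q.2)) := by
  induction fuel with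
  | zero => intro r p s prio st; simp [loopB]
  | succ f ih =>
    intro r p s prio st
    simp only [loopB]
    split_ifs
    · simp
    · simp
    · simp
    · simp
    · simp
    · simp
    rw [ih _ _ _ _ ((levelB prio).1 :: st), ih _ _ _ _ [(levelB prio).1]]
    cases loopB f (PySem.Int.floordiv (r + p + s) 2 - p) (PySem.Int.floordiv (r + p + s) 2 - s)
        (PySem.Int.floordiv (r + p + s) 2 - r) (levelB prio).2 [] <;> simp

theorem main_eq (fuel : Nat) : ∀ (r p s : Int) (prio : List Int),
    solveFuel fuel r p s prio =
      (loopB fuel r p s prio []).map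
        (fun q => q.1.foldl (fun cur w => cur.flatMap (fun x => PySem.List.pyGetD w x [])) q.2) := by
  induction fuel with
  | zero => intro r p s prio; simp [solveFuel, loopB]
  | succ f ih =>
    intro r p s prio
    simp only [solveFuel, loopB]
    split_ifs with h1 h2 h3 h4 h5 h6 h7
    · simp
    · simp
    · simp
    · simp
    · simp
    · simp
    · -- A's 'low % 2' test cannot fire once n is even
      exfalso
      rw [PySem.Int.mod_eq_emod_of_pos (by norm_num : (0:Int) < 2)] at h5 h7
      omega
    · -- the recursive step
      have harg1 : r - PySem.Int.floordiv (r + p - s) 2 = PySem.Int.floordiv (r + p + s) 2 - p := by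
        rw [PySem.Int.mod_eq_emod_of_pos (by norm_num : (0:Int) < 2)] at h5
        rw [PySem.Int.floordiv_eq_ediv_of_pos (by norm_num : (0:Int) < 2),
          PySem.Int.floordiv_eq_ediv_of_pos (by norm_num : (0:Int) < 2)]; omega
      have harg2 : PySem.Int.floordiv (r + p - s) 2 = PySem.Int.floordiv (r + p + s) 2 - s := by
        rw [PySem.Int.mod_eq_emod_of_pos (by norm_num : (0:Int) < 2)] at h5
        rw [PySem.Int.floordiv_eq_ediv_of_pos (by norm_num : (0:Int) < 2),
          PySem.Int.floordiv_eq_ediv_of_pos (by norm_num : (0:Int) < 2)]; omega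
      have harg3 : p - PySem.Int.floordiv (r + p - s) 2 = PySem.Int.floordiv (r + p + s) 2 - r := by
        rw [PySem.Int.mod_eq_emod_of_pos (by norm_num : (0:Int) < 2)] at h5
        rw [PySem.Int.floordiv_eq_ediv_of_pos (by norm_num : (0:Int) < 2),
          PySem.Int.floordiv_eq_ediv_of_pos (by norm_num : (0:Int) < 2)]; omega
      rw [← level_eq, ← harg1, ← harg2, ← harg3, loopB_stack f, ih]
      cases loopB f (r - PySem.Int.floordiv (r + p - s) 2) (PySem.Int.floordiv (r + p - s) 2)
          (p - PySem.Int.floordiv (r + p - s) 2) (levelA prio).2 [] with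
      | none => rfl
      | some q => simp [expandA, List.foldl_append, PySem.List.foldl_append_eq_flatMap, List.flatMap_def]

-- ===== VERDICT (by name: the statement is the Claim_ definition above) =====
theorem solve_spec : Claim_equal_solve := by
  intro r p s prio _ _
  unfold Spec_solve solve solve_alt
  rw [main_eq]
  cases hq : loopB ((r + p + s).natAbs + 1) r p s prio [] with
  | none => rfl
  | some q => obtain ⟨st, cur⟩ := q; rfl
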